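-- pv_equiv track=rewrite | github.com/QuantCrimAtLeeds/PredictCode | open_cp/evaluation.py | yield_hit_rates_segments
-- ===== SOURCE A (Python) =====
-- def yield_hit_rates_segments(ordered_risk, ordered_counts):
--     """`ordered_risk` is a non-increasing 1D array of risks.
--     `ordered_counts` is an array, same shape, of integer counts.
--     A "segment" is a run of equal values in `ordered_risk`.  Yields
--     pairs `(count, index)` where `count` is the sum of `ordered_counts`
--     for each segment, and `index` is the current index.
--
--     E.g. [7,7,5,3,3,1], [1,1,0,1,2,0] -->  (2,1), (0,2), (3,4), (0,5)
--     """
--     previous_index = 0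
--     index = 0
--     while True:
--         current_sum = 0
--         while ordered_risk[previous_index] == ordered_risk[index]:
--             current_sum += ordered_counts[index]
--             index += 1
--             if index == len(ordered_risk):
--                 yield current_sum, index - 1
--                 return
--         yield current_sum, index - 1
--         previous_index = index
-- ===== SOURCE B (Python) =====
-- def yield_hit_rates_segments(ordered_risk, ordered_counts):
--     """Prefix-sum / boundary-list re-implementation: build a prefix-sum array
--     of the counts, find segment boundaries by comparing ADJACENT risks, then
--     emit each segment's sum as a difference of two prefix sums."""
--     n = len(ordered_risk)
--     prefix = [0] * (n + 1)
--     for i in range(n):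
--         prefix[i + 1] = prefix[i] + ordered_counts[i]
--     ends = [i for i in range(n) if i + 1 == n or ordered_risk[i] != ordered_risk[i + 1]]
--     prev = 0
--     for e in ends:
--         yield prefix[e + 1] - prefix[prev], e
--         prev = e + 1
-- ===== Notes on version B (the rewrite author's own statement) =====
-- stated objective: alternative
-- what changed: Replaced A's two-pointer nested-while with a per-element running sum by three staged passes: precompute a prefix-sum array of the counts, build the segment-boundary list by comparing adjacent risks, then emit each segment's total as a difference of two prefix sums.
import Mathlib
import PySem

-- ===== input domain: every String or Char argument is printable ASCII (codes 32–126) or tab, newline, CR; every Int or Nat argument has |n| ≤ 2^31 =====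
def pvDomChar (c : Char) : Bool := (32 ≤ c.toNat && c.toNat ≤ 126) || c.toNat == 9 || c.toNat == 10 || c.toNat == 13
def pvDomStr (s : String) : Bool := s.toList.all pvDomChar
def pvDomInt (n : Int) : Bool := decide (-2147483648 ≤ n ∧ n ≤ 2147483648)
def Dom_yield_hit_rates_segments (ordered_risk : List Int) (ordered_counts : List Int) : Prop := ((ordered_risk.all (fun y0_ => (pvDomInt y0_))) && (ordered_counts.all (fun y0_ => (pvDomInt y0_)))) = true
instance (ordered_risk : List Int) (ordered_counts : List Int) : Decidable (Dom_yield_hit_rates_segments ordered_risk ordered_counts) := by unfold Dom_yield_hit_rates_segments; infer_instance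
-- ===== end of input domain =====

-- B replaces A's two-pointer nested-while by three staged passes: a prefix-sum
-- array of the counts, a boundary list found by comparing ADJACENT risks, and
-- an emit loop taking differences of prefix sums (alternative decomposition).
-- Equivalence is about the list of yielded pairs of the generators.

-- ===== PORT A =====
-- Inner `while ordered_risk[previous_index] == ordered_risk[index]` loop of A.
-- Indices are always nonnegative in A, so `l[i]` is ported exactly as `l[i]?`
-- (none = IndexError, reported in the `err` flag; such inputs are outside Pre_).
-- Returns (current_sum, index, finished, err).
def pvA_inner (risk counts : List Int) (pi idx : Nat) (s : Int) : Int × Nat × Bool × Bool :=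
  match risk[pi]?, hi : risk[idx]? with
  | some a, some b =>
    if a = b then
      match counts[idx]? with
      | some c =>
        if idx + 1 = risk.length then (s + c, idx + 1, true, false)   -- yield and return
        else pvA_inner risk counts pi (idx + 1) (s + c)
      | none => (s, idx, false, true)                                 -- IndexError on counts
    else (s, idx, false, false)                                       -- exit inner loop
  | _, _ => (s, idx, false, true)                                     -- IndexError on risk
termination_by risk.length - idx
decreasing_by
  have : idx < risk.length := by
    have := List.getElem?_eq_some_iff.mp hi; exact this.1
  omega

-- Outer `while True` loop of A; `fuel` only makes the loop total (each pass
-- advances `index` or returns, so `risk.length + 1` passes always suffice).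
def pvA_outer (fuel : Nat) (risk counts : List Int) (pi idx : Nat) (acc : List (Int × Int)) : List (Int × Int) :=
  match fuel with
  | 0 => acc
  | fuel + 1 =>
    let r := pvA_inner risk counts pi idx 0
    if r.2.2.2 then acc                                              -- IndexError: outside Pre_
    else if r.2.2.1 then acc ++ [(r.1, (r.2.1 : Int) - 1)]           -- final yield, return
    else pvA_outer fuel risk counts r.2.1 r.2.1 (acc ++ [(r.1, (r.2.1 : Int) - 1)])

def yield_hit_rates_segments (ordered_risk : List Int) (ordered_counts : List Int) : List (Int × Int) :=
  pvA_outer (ordered_risk.length + 1) ordered_risk ordered_counts 0 0 []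

-- ===== PORT B =====
-- `prefix = [0]*(n+1); for i in range(n): prefix[i+1] = prefix[i]+counts[i]`:
-- the loop grows the meaningful part of the array one cell per step, ported as
-- a fold over range n appending one cell (`getD 0` = Python indexing, exact on
-- Pre_ where every read index is in range).
def pvPrefixB (counts : List Int) (n : Nat) : List Int :=
  (List.range n).foldl (fun pre i => pre ++ [pre.getD i 0 + counts.getD i 0]) [0]

-- `[i for i in range(n) if i+1 == n or ordered_risk[i] != ordered_risk[i+1]]`
-- (Python's `or` short-circuits, so risk[i+1] is only read when i+1 < n; the
-- getD default is therefore never used on Pre_).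
def pvEndsB (risk : List Int) (n : Nat) : List Nat :=
  (List.range n).filter (fun i => i + 1 == n || risk.getD i 0 != risk.getD (i + 1) 0)

-- `prev = 0; for e in ends: yield prefix[e+1]-prefix[prev], e; prev = e+1`
def pvEmitB (pre : List Int) (ends : List Nat) (prev : Nat) : List (Int × Int) :=
  match ends with
  | [] => []
  | e :: rest => (pre.getD (e + 1) 0 - pre.getD prev 0, (e : Int)) :: pvEmitB pre rest (e + 1)

def yield_hit_rates_segments_alt (ordered_risk : List Int) (ordered_counts : List Int) : List (Int × Int) :=
  pvEmitB (pvPrefixB ordered_counts ordered_risk.length)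
    (pvEndsB ordered_risk ordered_risk.length) 0

-- ===== PRECONDITION & SPEC =====
-- Pre_ excludes exactly the inputs on which A raises IndexError: an empty
-- risk list, or a counts list shorter than the risk list (A reads
-- ordered_counts[i] for every i < len(ordered_risk)).
def Pre_yield_hit_rates_segments (ordered_risk : List Int) (ordered_counts : List Int) : Prop :=
  ordered_risk ≠ [] ∧ ordered_risk.length ≤ ordered_counts.length
instance (ordered_risk : List Int) (ordered_counts : List Int) : Decidable (Pre_yield_hit_rates_segments ordered_risk ordered_counts) := by unfold Pre_yield_hit_rates_segments; infer_instance

def pvWitness_yield_hit_rates_segments : List Int × List Int := ([7, 7, 5, 3, 3, 1], [1, 1, 0, 1, 2, 0])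

def Spec_yield_hit_rates_segments (ordered_risk : List Int) (ordered_counts : List Int) (out : List (Int × Int)) : Prop := out = yield_hit_rates_segments_alt ordered_risk ordered_counts
instance (ordered_risk : List Int) (ordered_counts : List Int) (out : List (Int × Int)) : Decidable (Spec_yield_hit_rates_segments ordered_risk ordered_counts out) := by unfold Spec_yield_hit_rates_segments; infer_instance

-- ===== CLAIM (what is proved, stated in full; the proofs are below) =====
def Claim_equal_yield_hit_rates_segments : Prop := ∀ (ordered_risk : List Int) (ordered_counts : List Int), Dom_yield_hit_rates_segments ordered_risk ordered_counts → Pre_yield_hit_rates_segments ordered_risk ordered_counts → Spec_yield_hit_rates_segments ordered_risk ordered_counts (yield_hit_rates_segments ordered_risk ordered_counts)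

-- ===== LEMMAS AND PROOFS =====

-- proof-side intermediate: the run-peeling view of the segment list
def pvMid (risk counts : List Int) (off : Nat) : List (Int × Int) :=
  if h : off < risk.length then
    let k := off + (risk.drop off).findIdx (fun x => x ≠ risk[off])
    (((counts.drop off).take (k - off)).sum, (k : Int) - 1) :: pvMid risk counts k
  else []
termination_by risk.length - off
decreasing_by
  have h1 : 1 ≤ (risk.drop off).findIdx (fun x => x ≠ risk[off]) := by
    rw [List.drop_eq_getElem_cons h, List.findIdx_cons]
    simp
  omega

-- length of the run of values equal to `r` starting at position `j`
def pvRunLen (risk : List Int) (r : Int) (j : Nat) : Nat :=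
  (risk.drop j).findIdx (fun x => x ≠ r)

theorem pvRunLen_succ (risk : List Int) (r : Int) (j : Nat) (hj : j < risk.length)
    (heq : risk[j] = r) : pvRunLen risk r j = pvRunLen risk r (j + 1) + 1 := by
  unfold pvRunLen
  rw [List.drop_eq_getElem_cons hj, List.findIdx_cons]
  simp [heq]

theorem pvRunLen_zero (risk : List Int) (r : Int) (j : Nat) (hj : j < risk.length)
    (hne : risk[j] ≠ r) : pvRunLen risk r j = 0 := by
  unfold pvRunLen
  rw [List.drop_eq_getElem_cons hj, List.findIdx_cons]
  simp [hne]

theorem pvRunLen_le (risk : List Int) (r : Int) (j : Nat) (hj : j ≤ risk.length) :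
    j + pvRunLen risk r j ≤ risk.length := by
  have h := List.findIdx_le_length (p := fun x => x ≠ r) (xs := risk.drop j)
  unfold pvRunLen
  simp only [List.length_drop] at h
  omega

theorem pvA_inner_spec (risk counts : List Int) (i : Nat) (r : Int)
    (hi : risk[i]? = some r) (hlen : risk.length ≤ counts.length) :
    ∀ j s, j < risk.length →
      pvA_inner risk counts i j s =
        (if pvRunLen risk r j = 0 then (s, j, false, false)
         else if j + pvRunLen risk r j = risk.length then
           (s + ((counts.drop j).take (pvRunLen risk r j)).sum, risk.length, true, false)
         else (s + ((counts.drop j).take (pvRunLen risk r j)).sum, j + pvRunLen risk r j, false, false)) := by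
  intro j
  induction hn : risk.length - j using Nat.strong_induction_on generalizing j with
  | _ n ih =>
  intro s hj
  have hb : risk[j]? = some risk[j] := List.getElem?_eq_getElem hj
  have hjc : j < counts.length := lt_of_lt_of_le hj hlen
  have hc : counts[j]? = some counts[j] := List.getElem?_eq_getElem hjc
  have hdc : counts.drop j = counts[j] :: counts.drop (j + 1) := List.drop_eq_getElem_cons hjc
  rw [pvA_inner, hi, hb]
  by_cases heq : r = risk[j]
  · have hstep : pvRunLen risk r j = pvRunLen risk r (j + 1) + 1 :=
      pvRunLen_succ risk r j hj heq.symm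
    have hsum : ((counts.drop j).take (pvRunLen risk r (j + 1) + 1)).sum
        = counts[j] + ((counts.drop (j + 1)).take (pvRunLen risk r (j + 1))).sum := by
      rw [hdc, List.take_succ_cons, List.sum_cons]
    simp only [if_pos heq, hc]
    by_cases hend : j + 1 = risk.length
    · have hz : pvRunLen risk r (j + 1) = 0 := by
        unfold pvRunLen
        rw [List.drop_eq_nil_of_le (by omega : risk.length ≤ j + 1)]
        simp
      rw [if_pos hend, hstep, hz]
      rw [if_neg (by omega : ¬ (0 + 1 = 0)), if_pos (by omega : j + (0 + 1) = risk.length)]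
      rw [hz] at hsum
      rw [hsum]
      simp [hend]
    · have hj1 : j + 1 < risk.length := by
        have := List.getElem?_eq_some_iff.mp hb
        omega
      rw [if_neg hend, ih (risk.length - (j + 1)) (by omega) (j + 1) rfl (s + counts[j]) hj1]
      rw [hstep, hsum]
      by_cases hk0 : pvRunLen risk r (j + 1) = 0
      · rw [if_pos hk0, hk0]
        rw [if_neg (by omega : ¬ (0 + 1 = 0)), if_neg (by omega : ¬ j + (0 + 1) = risk.length)]
        simp
      · rw [if_neg hk0]
        by_cases hend2 : j + 1 + pvRunLen risk r (j + 1) = risk.length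
        · rw [if_pos hend2, if_neg (by omega : ¬ pvRunLen risk r (j + 1) + 1 = 0),
            if_pos (by omega : j + (pvRunLen risk r (j + 1) + 1) = risk.length)]
          rw [add_assoc]
        · rw [if_neg hend2, if_neg (by omega : ¬ pvRunLen risk r (j + 1) + 1 = 0),
            if_neg (by omega : ¬ j + (pvRunLen risk r (j + 1) + 1) = risk.length)]
          rw [add_assoc]
          have : j + 1 + pvRunLen risk r (j + 1) = j + (pvRunLen risk r (j + 1) + 1) := by omega
          rw [this]
  · have hz : pvRunLen risk r j = 0 := pvRunLen_zero risk r j hj (fun h => heq h.symm)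
    simp [heq, hz]

theorem pvMid_cons (risk counts : List Int) (off : Nat) (h : off < risk.length) :
    pvMid risk counts off =
      (((counts.drop off).take (pvRunLen risk risk[off] off)).sum,
        ((off + pvRunLen risk risk[off] off : Nat) : Int) - 1)
      :: pvMid risk counts (off + pvRunLen risk risk[off] off) := by
  rw [pvMid, dif_pos h]
  simp only [pvRunLen]
  rw [Nat.add_sub_cancel_left]

theorem pvMid_stop (risk counts : List Int) (off : Nat) (h : risk.length ≤ off) :
    pvMid risk counts off = [] := by
  rw [pvMid, dif_neg (by omega)]

theorem pvA_outer_spec (risk counts : List Int) (hlen : risk.length ≤ counts.length) :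
    ∀ fuel i acc, i < risk.length → risk.length - i < fuel →
      pvA_outer fuel risk counts i i acc = acc ++ pvMid risk counts i := by
  intro fuel
  induction fuel with
  | zero => intro i acc hi hf; omega
  | succ fuel ih =>
    intro i acc hi hf
    have hgi : risk[i]? = some risk[i] := List.getElem?_eq_getElem hi
    have hinner := pvA_inner_spec risk counts i risk[i] hgi hlen i 0 hi
    have hkpos : pvRunLen risk risk[i] i ≠ 0 := by
      rw [pvRunLen_succ risk risk[i] i hi rfl]; omega
    have hkle : i + pvRunLen risk risk[i] i ≤ risk.length := pvRunLen_le risk risk[i] i (le_of_lt hi)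
    have hB := pvMid_cons risk counts i hi
    by_cases hend : i + pvRunLen risk risk[i] i = risk.length
    · have hinner' : pvA_inner risk counts i i 0
          = (0 + ((counts.drop i).take (pvRunLen risk risk[i] i)).sum, risk.length, true, false) := by
        rw [hinner, if_neg hkpos, if_pos hend]
      rw [pvA_outer]
      simp only [hinner']
      rw [hB, pvMid_stop risk counts _ (le_of_eq hend.symm)]
      simp
      omega
    · have hik : i + pvRunLen risk risk[i] i < risk.length := lt_of_le_of_ne hkle hend
      have hinner' : pvA_inner risk counts i i 0
          = (0 + ((counts.drop i).take (pvRunLen risk risk[i] i)).sum,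
              i + pvRunLen risk risk[i] i, false, false) := by
        rw [hinner, if_neg hkpos, if_neg hend]
      rw [pvA_outer]
      simp only [hinner']
      rw [ih (i + pvRunLen risk risk[i] i)
        (acc ++ [(0 + ((counts.drop i).take (pvRunLen risk risk[i] i)).sum,
          ((i + pvRunLen risk risk[i] i : Nat) : Int) - 1)]) hik (by omega)]
      rw [hB]
      simp [List.append_assoc]

-- ---- B-side characterisations ----

theorem pvPrefixB_eq (counts : List Int) :
    ∀ n, n ≤ counts.length →
      pvPrefixB counts n = (List.range (n + 1)).map (fun j => (counts.take j).sum) := by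
  intro n
  induction n with
  | zero => intro _; simp [pvPrefixB]
  | succ n ih =>
    intro hn
    have hn' : n < counts.length := by omega
    unfold pvPrefixB at *
    rw [List.range_succ, List.foldl_append, ih (by omega)]
    have hget : counts[n]? = some counts[n] := List.getElem?_eq_getElem hn'
    have h1 : ((List.range (n + 1)).map (fun j => (counts.take j).sum)).getD n 0
        = (counts.take n).sum := by
      rw [List.getD_eq_getElem?_getD, List.getElem?_map, List.getElem?_range (by omega : n < n + 1)]
      rfl
    have h2 : counts.getD n 0 = counts[n] := by
      rw [List.getD_eq_getElem?_getD, hget]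
      rfl
    rw [List.foldl_cons, List.foldl_nil, h1, h2]
    rw [show n + 1 + 1 = (n + 1) + 1 from rfl, List.range_succ (n := n + 1), List.map_append]
    congr 1
    have h3 : (counts.take (n + 1)).sum = (counts.take n).sum + counts[n] :=
      List.sum_take_succ counts n hn' 
    rw [List.map_cons, List.map_nil, h3]

theorem pvPrefixB_getD (counts : List Int) (n j : Nat) (hn : n ≤ counts.length) (hj : j ≤ n) :
    (pvPrefixB counts n).getD j 0 = (counts.take j).sum := by
  rw [pvPrefixB_eq counts n hn]
  rw [List.getD_eq_getElem?_getD, List.getElem?_map, List.getElem?_range (by omega : j < n + 1)]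
  rfl

-- run facts from findIdx
theorem pvRun_eq (risk : List Int) (off k : Nat) (hoff : off < risk.length)
    (hk : k < pvRunLen risk risk[off] off) (hik : off + k < risk.length) :
    risk[off + k] = risk[off] := by
  have h := List.not_of_lt_findIdx (p := fun x => decide (x ≠ risk[off])) (xs := risk.drop off) hk
  simp only [List.getElem_drop, decide_eq_false_iff_not, not_not] at h
  exact h

theorem pvRun_end (risk : List Int) (off : Nat) (hoff : off < risk.length)
    (h : off + pvRunLen risk risk[off] off < risk.length) :
    risk[off + pvRunLen risk risk[off] off] ≠ risk[off] := by
  have hw : List.findIdx (fun x => decide (x ≠ risk[off])) (risk.drop off) < (risk.drop off).length := by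
    simp only [List.length_drop]
    have : pvRunLen risk risk[off] off = List.findIdx (fun x => decide (x ≠ risk[off])) (risk.drop off) := rfl
    omega
  have h := List.findIdx_getElem (p := fun x => decide (x ≠ risk[off])) (xs := risk.drop off) (w := hw)
  simp only [List.getElem_drop, decide_eq_true_eq] at h
  exact h

-- boundary-list split: the first boundary at or after `off` is the end of the run at `off`
theorem pvEnds_split (risk : List Int) (off : Nat) (hoff : off < risk.length) :
    (List.range' off (risk.length - off)).filter
        (fun i => i + 1 == risk.length || risk.getD i 0 != risk.getD (i + 1) 0)
      = (off + pvRunLen risk risk[off] off - 1)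
        :: (List.range' (off + pvRunLen risk risk[off] off)
              (risk.length - (off + pvRunLen risk risk[off] off))).filter
            (fun i => i + 1 == risk.length || risk.getD i 0 != risk.getD (i + 1) 0) := by
  have hL1 : 1 ≤ pvRunLen risk risk[off] off := by
    rw [pvRunLen_succ risk risk[off] off hoff rfl]; omega
  have hLe : off + pvRunLen risk risk[off] off ≤ risk.length :=
    pvRunLen_le risk risk[off] off (le_of_lt hoff)
  have hgetD : ∀ j, (hj : j < risk.length) → risk.getD j 0 = risk[j] := by
    intro j hj
    rw [List.getD_eq_getElem?_getD, List.getElem?_eq_getElem hj]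
    rfl
  have hrun : ∀ j, off ≤ j → j < off + pvRunLen risk risk[off] off → risk.getD j 0 = risk[off] := by
    intro j h1 h2
    have hjn : j < risk.length := by omega
    rw [hgetD j hjn]
    rw [show risk[j] = risk[off + (j - off)] from by congr 1; omega]
    exact pvRun_eq risk off (j - off) hoff (by omega) (by omega)
  have hsplit1 : List.range' off (risk.length - off)
      = List.range' off (pvRunLen risk risk[off] off)
        ++ List.range' (off + pvRunLen risk risk[off] off)
             (risk.length - (off + pvRunLen risk risk[off] off)) := by
    have h := List.range'_append (s := off) (m := pvRunLen risk risk[off] off)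
      (n := risk.length - (off + pvRunLen risk risk[off] off)) (step := 1)
    simp only [one_mul] at h
    rw [show risk.length - off
        = pvRunLen risk risk[off] off + (risk.length - (off + pvRunLen risk risk[off] off)) from by omega]
    exact h.symm
  have hsplit2 : List.range' off (pvRunLen risk risk[off] off)
      = List.range' off (pvRunLen risk risk[off] off - 1) ++ [off + (pvRunLen risk risk[off] off - 1)] := by
    have h := List.range'_1_concat (s := off) (n := pvRunLen risk risk[off] off - 1)
    rw [show pvRunLen risk risk[off] off = (pvRunLen risk risk[off] off - 1) + 1 from by omega]
    exact h
  have hnilfilter : (List.range' off (pvRunLen risk risk[off] off - 1)).filter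
      (fun i => i + 1 == risk.length || risk.getD i 0 != risk.getD (i + 1) 0) = [] := by
    rw [List.filter_eq_nil_iff]
    intro j hj
    obtain ⟨i, hi, rfl⟩ := List.mem_range'.mp hj
    simp only [one_mul, Bool.or_eq_true, beq_iff_eq, bne_iff_ne, ne_eq, not_or, not_not]
    refine ⟨by omega, ?_⟩
    rw [hrun (off + i) (by omega) (by omega), hrun (off + i + 1) (by omega) (by omega)]
  have hpred : ((off + (pvRunLen risk risk[off] off - 1)) + 1 == risk.length
      || risk.getD (off + (pvRunLen risk risk[off] off - 1)) 0
         != risk.getD ((off + (pvRunLen risk risk[off] off - 1)) + 1) 0) = true := by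
    by_cases hend : off + pvRunLen risk risk[off] off = risk.length
    · simp [show off + (pvRunLen risk risk[off] off - 1) + 1 = risk.length from by omega]
    · have h1 : risk.getD (off + (pvRunLen risk risk[off] off - 1)) 0 = risk[off] :=
        hrun (off + (pvRunLen risk risk[off] off - 1)) (by omega) (by omega)
      have h2 : risk.getD (off + (pvRunLen risk risk[off] off - 1) + 1) 0
          = risk[off + pvRunLen risk risk[off] off]'(by omega) := by
        rw [hgetD (off + (pvRunLen risk risk[off] off - 1) + 1) (by omega)]
        congr 1
        omega
      have hne := pvRun_end risk off hoff (by omega)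
      rw [h1, h2]
      simp only [Bool.or_eq_true, bne_iff_ne, ne_eq]
      exact Or.inr (fun h => hne (h.symm))
  rw [hsplit1, List.filter_append, hsplit2, List.filter_append, hnilfilter]
  simp only [List.filter_cons, List.filter_nil, hpred, if_pos]
  rw [show off + (pvRunLen risk risk[off] off - 1) = off + pvRunLen risk risk[off] off - 1 from by omega]
  simp

theorem pvMid_emit (risk counts : List Int) (hlen : risk.length ≤ counts.length) :
    ∀ off, off ≤ risk.length →
      pvMid risk counts off
        = pvEmitB (pvPrefixB counts risk.length)
            ((List.range' off (risk.length - off)).filter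
              (fun i => i + 1 == risk.length || risk.getD i 0 != risk.getD (i + 1) 0)) off := by
  intro off
  induction hm : risk.length - off using Nat.strong_induction_on generalizing off with
  | _ m ih =>
  intro hoff
  subst hm
  by_cases h : off < risk.length
  · have hL1 : 1 ≤ pvRunLen risk risk[off] off := by
      rw [pvRunLen_succ risk risk[off] off h rfl]; omega
    have hLe : off + pvRunLen risk risk[off] off ≤ risk.length :=
      pvRunLen_le risk risk[off] off (le_of_lt h)
    rw [pvMid_cons risk counts off h, pvEnds_split risk off h, pvEmitB]
    have hidx : off + pvRunLen risk risk[off] off - 1 + 1 = off + pvRunLen risk risk[off] off := by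
      omega
    congr 1
    · -- heads agree
      have hs1 : (pvPrefixB counts risk.length).getD (off + pvRunLen risk risk[off] off - 1 + 1) 0
          = (counts.take (off + pvRunLen risk risk[off] off)).sum := by
        rw [hidx]; exact pvPrefixB_getD counts risk.length _ hlen hLe
      have hs2 : (pvPrefixB counts risk.length).getD off 0 = (counts.take off).sum := by
        exact pvPrefixB_getD counts risk.length off hlen (by omega)
      have hsum : (counts.take (off + pvRunLen risk risk[off] off)).sum
          = (counts.take off).sum + ((counts.drop off).take (pvRunLen risk risk[off] off)).sum := by
        rw [List.take_add, List.sum_append]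
      rw [hs1, hs2, hsum, Prod.mk.injEq]
      constructor <;> omega
    · -- tails agree
      rw [hidx]
      exact (ih (risk.length - (off + pvRunLen risk risk[off] off)) (by omega)
        (off + pvRunLen risk risk[off] off) rfl hLe).symm ▸ rfl
  · have hoff' : off = risk.length := by omega
    rw [pvMid_stop risk counts off (by omega)]
    rw [show risk.length - off = 0 from by omega]
    simp [pvEmitB]

-- ===== VERDICT (by name: the statement is the Claim_ definition above) =====
theorem yield_hit_rates_segments_spec : Claim_equal_yield_hit_rates_segments := by
  intro risk counts _ hpre
  unfold Spec_yield_hit_rates_segments yield_hit_rates_segments yield_hit_rates_segments_alt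
  obtain ⟨hne, hlen⟩ := hpre
  have h0 : 0 < risk.length := List.length_pos_iff.mpr hne
  have hA := pvA_outer_spec risk counts hlen (risk.length + 1) 0 [] h0 (by omega)
  have hE := pvMid_emit risk counts hlen 0 (by omega)
  rw [hA]
  simp only [List.nil_append]
  rw [hE]
  unfold pvEndsB
  rw [List.range_eq_range']
  simp
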